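-- pv_equiv track=rewrite | github.com/pabsan-0/yolo-tools | makecfg.py | exact_filter_line
-- ===== SOURCE A (Python) =====
-- def exact_filter_line(file_content):
--     """ Get the exact line of the last filter line before each yolo layer """
--
--     # Scan the file for the [yolo] and filter= lines
--     yolo_lines = [i for i,line in enumerate(file_content) if '[yolo]' in line]
--     filter_lines = [i for i,line in enumerate(file_content) if 'filters' in line]
--
--     # Get only the filter lines prior to yolo layers
--     exact_filter_list = []
--     for i in yolo_lines:
--         it = filter(lambda number: number < i, filter_lines)
--         filtered_numbers = list(it)
--         exact_filter_list.append(filtered_numbers[-1])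
--
--     return exact_filter_list
-- ===== SOURCE B (Python) =====
-- def exact_filter_line(file_content):
--     """ Get the exact line of the last filter line before each yolo layer
--         (single pass: remember the most recent 'filters' line seen so far) """
--     exact_filter_list = []
--     last = None
--     for i, line in enumerate(file_content):
--         if '[yolo]' in line:
--             exact_filter_list.append(last)
--         if 'filters' in line:
--             last = i
--     return exact_filter_list
-- ===== Notes on version B (the rewrite author's own statement) =====
-- stated objective: faster
-- what changed: Replaces the per-yolo re-scan of all filter lines (filter + last element for every yolo line) by one single pass that remembers the most recent 'filters' line index and emits it at each '[yolo]' line.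
import Mathlib
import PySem

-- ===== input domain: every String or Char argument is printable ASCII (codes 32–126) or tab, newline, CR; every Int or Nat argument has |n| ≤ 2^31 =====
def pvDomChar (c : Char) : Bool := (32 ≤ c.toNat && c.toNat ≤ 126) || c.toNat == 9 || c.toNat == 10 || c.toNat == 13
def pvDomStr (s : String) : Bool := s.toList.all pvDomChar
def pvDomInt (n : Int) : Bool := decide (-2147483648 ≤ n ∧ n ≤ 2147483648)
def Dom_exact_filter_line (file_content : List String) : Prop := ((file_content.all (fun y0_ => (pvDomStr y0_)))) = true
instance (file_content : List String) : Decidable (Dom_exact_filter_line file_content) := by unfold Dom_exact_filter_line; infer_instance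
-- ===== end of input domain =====

-- B replaces A's per-yolo re-scan of all filter lines by one single pass that carries the
-- most recent 'filters' line index; equivalence is proved on inputs where A raises no IndexError.

-- ===== PORT A =====
-- literal transliteration of A: two enumerate-comprehensions, then for each yolo index the
-- list of smaller filter indices and its last element (filtered_numbers[-1]; Pre_ rules out
-- the empty case, where Python raises IndexError and the port's .getD 0 is unreachable)
def exact_filter_line (file_content : List String) : List Int :=
  let yolo_lines := ((PySem.List.enumerate file_content 0).filter
      (fun p => PySem.Str.isIn "[yolo]" p.2)).map (·.1)
  let filter_lines := ((PySem.List.enumerate file_content 0).filter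
      (fun p => PySem.Str.isIn "filters" p.2)).map (·.1)
  yolo_lines.foldl (fun acc i =>
    let filtered_numbers := filter_lines.filter (fun number => decide (number < i))
    acc ++ [(PySem.List.pyGet? filtered_numbers (-1)).getD 0]) []

-- ===== PORT B =====
-- B's single pass: state = (last 'filters' index seen : Option Int); at a '[yolo]' line the
-- current last is emitted (last = none only outside Pre_, where Python B appends None)
def exactFilterGo (ps : List (Int × String)) (last : Option Int) (out : List Int) : List Int :=
  match ps with
  | [] => out
  | (i, line) :: rest =>
      let out' := if PySem.Str.isIn "[yolo]" line then out ++ [last.getD 0] else out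
      let last' := if PySem.Str.isIn "filters" line then some i else last
      exactFilterGo rest last' out'

def exact_filter_line_alt (file_content : List String) : List Int :=
  exactFilterGo (PySem.List.enumerate file_content 0) none []

-- ===== PRECONDITION & SPEC =====
-- Pre_ excludes exactly the inputs where some '[yolo]' line has no earlier 'filters' line:
-- there Python A raises IndexError (filtered_numbers[-1] on an empty list).
def Pre_exact_filter_line (file_content : List String) : Prop :=
  ∀ k < file_content.length, PySem.Str.isIn "[yolo]" (file_content.getD k "") = true →
    ∃ j < k, PySem.Str.isIn "filters" (file_content.getD j "") = true

instance (file_content : List String) : Decidable (Pre_exact_filter_line file_content) := by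
  unfold Pre_exact_filter_line; infer_instance

def pvWitness_exact_filter_line : List String := ["filters=18", "[yolo]"]

def Spec_exact_filter_line (file_content : List String) (out : List Int) : Prop :=
  out = exact_filter_line_alt file_content
instance (file_content : List String) (out : List Int) : Decidable (Spec_exact_filter_line file_content out) := by
  unfold Spec_exact_filter_line; infer_instance

-- ===== CLAIM (what is proved, stated in full; the proofs are below) =====
def Claim_equal_exact_filter_line : Prop := ∀ (file_content : List String), Dom_exact_filter_line file_content → Pre_exact_filter_line file_content → Spec_exact_filter_line file_content (exact_filter_line file_content)

-- ===== LEMMAS AND PROOFS =====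

-- xs[-1] is the last element (as Options)
theorem pyGet_neg_one_eq_getLast? (xs : List Int) :
    PySem.List.pyGet? xs (-1) = xs.getLast? := by
  cases xs with
  | nil => simp [PySem.List.pyGet?, PySem.List.pyIdx?]
  | cons x t =>
      rw [PySem.List.pyGet?_neg_ofNat (x :: t) 1 (by omega) (by simp)]
      simp [List.getLast?_eq_getElem?]

-- every index produced by `enumerate xs s` is ≥ s
theorem fst_mem_enumerate_ge (xs : List String) (s : Int) (p : Int × String)
    (hp : p ∈ PySem.List.enumerate xs s) : s ≤ p.1 := by
  rw [PySem.List.mem_enumerate_iff] at hp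
  obtain ⟨k, hk, rfl⟩ := hp
  simp

-- main invariant: running B's loop on the suffix, with `last` = last element of the filter
-- indices fsPre collected from the prefix (all < s), computes `out` ++ A's per-yolo values,
-- where A filters the full index list fsPre ++ (filter indices of the suffix).
theorem go_eq (suffix : List String) : ∀ (s : Int) (fsPre : List Int) (out : List Int),
    (∀ x ∈ fsPre, x < s) →
    exactFilterGo (PySem.List.enumerate suffix s) fsPre.getLast? out
      = out ++ (((PySem.List.enumerate suffix s).filter
            (fun p => PySem.Str.isIn "[yolo]" p.2)).map (·.1)).map
          (fun i => (PySem.List.pyGet?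
              ((fsPre ++ (((PySem.List.enumerate suffix s).filter
                  (fun p => PySem.Str.isIn "filters" p.2)).map (·.1))).filter
                (fun number => decide (number < i))) (-1)).getD 0) := by
  induction suffix with
  | nil => intro s fsPre out _; simp [PySem.List.enumerate_nil, exactFilterGo]
  | cons x rest ih =>
      intro s fsPre out hlt
      rw [PySem.List.enumerate_cons]
      simp only [exactFilterGo]
      have hpre_self : fsPre.filter (fun number => decide (number < s)) = fsPre :=
        List.filter_eq_self.mpr (fun a ha => by simpa using hlt a ha)
      have hmfr : ∀ y ∈ (((PySem.List.enumerate rest (s+1)).filter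
          (fun p => PySem.Str.isIn "filters" p.2)).map (·.1)), s + 1 ≤ y := by
        intro y hy
        obtain ⟨p, hp, rfl⟩ := List.mem_map.mp hy
        exact fst_mem_enumerate_ge rest (s+1) p (List.mem_filter.mp hp).1
      have hmfr_nil : ((((PySem.List.enumerate rest (s+1)).filter
          (fun p => PySem.Str.isIn "filters" p.2)).map (·.1)).filter
            (fun number => decide (number < s))) = [] :=
        List.filter_eq_nil_iff.mpr (fun a ha => by
          have := hmfr a ha; simp only [decide_eq_true_eq]; omega)
      have hlt1 : ∀ a ∈ fsPre, a < s + 1 := fun a ha => by have := hlt a ha; omega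
      have hlt1' : ∀ a ∈ fsPre ++ [s], a < s + 1 := by
        intro a ha; rcases List.mem_append.mp ha with h | h
        · have := hlt a h; omega
        · simp at h; omega
      by_cases hfb : PySem.Str.isIn "filters" x = true <;>
      by_cases hyb : PySem.Str.isIn "[yolo]" x = true <;>
        simp only [hfb, hyb, if_false, List.filter_cons, if_pos,
          Bool.false_eq_true, List.map_cons]
      case pos =>
        rw [show (some s) = (fsPre ++ [s]).getLast? by simp,
            ih (s+1) (fsPre ++ [s]) (out ++ [fsPre.getLast?.getD 0]) hlt1']
        generalize hg : List.map (fun x => x.1) (List.filter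
            (fun p => PySem.Str.isIn "filters" p.2) (PySem.List.enumerate rest (s + 1))) = mfr
            at hmfr_nil ⊢
        have hfil : (fsPre ++ s :: mfr).filter (fun number => decide (number < s)) = fsPre := by
          rw [List.filter_append, List.filter_cons]
          simp [hpre_self, hmfr_nil]
        have happ : fsPre ++ [s] ++ mfr = fsPre ++ s :: mfr := by simp
        have hval : (PySem.List.pyGet? fsPre (-1)).getD 0 = fsPre.getLast?.getD 0 := by
          rw [pyGet_neg_one_eq_getLast?]
        rw [happ, hfil, hval]
        simp
      case neg =>
        rw [show (some s) = (fsPre ++ [s]).getLast? by simp,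
            ih (s+1) (fsPre ++ [s]) out hlt1']
        generalize hg : List.map (fun x => x.1) (List.filter
            (fun p => PySem.Str.isIn "filters" p.2) (PySem.List.enumerate rest (s + 1))) = mfr
        have happ : fsPre ++ [s] ++ mfr = fsPre ++ s :: mfr := by simp
        rw [happ]
      case pos =>
        rw [ih (s+1) fsPre (out ++ [fsPre.getLast?.getD 0]) hlt1]
        generalize hg : List.map (fun x => x.1) (List.filter
            (fun p => PySem.Str.isIn "filters" p.2) (PySem.List.enumerate rest (s + 1))) = mfr
            at hmfr_nil ⊢
        have hfil : (fsPre ++ mfr).filter (fun number => decide (number < s)) = fsPre := by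
          rw [List.filter_append]
          simp [hpre_self, hmfr_nil]
        have hval : (PySem.List.pyGet? fsPre (-1)).getD 0 = fsPre.getLast?.getD 0 := by
          rw [pyGet_neg_one_eq_getLast?]
        rw [hfil, hval]
        simp
      case neg =>
        rw [ih (s+1) fsPre out hlt1]

-- ===== VERDICT (by name: the statement is the Claim_ definition above) =====
theorem exact_filter_line_spec : Claim_equal_exact_filter_line := by
  intro fc _ _
  unfold Spec_exact_filter_line exact_filter_line exact_filter_line_alt
  rw [show (none : Option Int) = ([] : List Int).getLast? from rfl,
      go_eq fc 0 [] [] (by simp)]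
  simp only [PySem.List.foldl_append_singleton_eq_map, List.nil_append]
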